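-- pv_equiv track=rewrite | github.com/botnebuladiscord/nebula | nebulafunctions/math/fmath.py | nebulaisdigit
-- ===== SOURCE A (Python) =====
-- def nebulaisdigit(query):
--     query = str(query)
--     if query.startswith('-'):
--         query = query[1:]
--     if '.' in query:
--         for i in query:
--             if i == '.':
--                 decimalpoint = query.index(i)
--                 query = query[:decimalpoint] + query[decimalpoint+1:]
--                 break
--     if query.isdigit():
--         return True
--     else:
--         return False
-- ===== SOURCE B (Python) =====
-- def nebulaisdigit(query):
--     s = str(query)
--     if s.startswith('-'):
--         s = s[1:]
--     seen_dot = False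
--     has_char = False
--     for c in s:
--         if c == '.' and not seen_dot:
--             seen_dot = True
--             continue
--         if not c.isdigit():
--             return False
--         has_char = True
--     return has_char
-- ===== Notes on version B (the rewrite author's own statement) =====
-- stated objective: simpler
-- what changed: Replaces A's scan-for-dot / str.index / slice-and-concatenate rebuild of the string followed by a full isdigit() pass with one single-pass character state machine (seen_dot/has_char flags) that never builds an intermediate string.
import Mathlib
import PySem

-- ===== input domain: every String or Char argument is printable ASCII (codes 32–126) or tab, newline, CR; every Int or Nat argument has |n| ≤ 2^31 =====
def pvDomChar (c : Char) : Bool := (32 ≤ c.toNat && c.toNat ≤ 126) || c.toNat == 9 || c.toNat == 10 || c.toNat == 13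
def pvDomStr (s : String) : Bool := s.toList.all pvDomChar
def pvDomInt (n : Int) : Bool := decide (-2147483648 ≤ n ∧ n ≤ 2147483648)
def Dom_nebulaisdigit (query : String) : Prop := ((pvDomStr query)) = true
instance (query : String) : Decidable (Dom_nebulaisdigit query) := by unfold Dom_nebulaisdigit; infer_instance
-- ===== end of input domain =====

-- B replaces A's remove-first-dot-then-isdigit() rebuild with a single-pass seen_dot/has_char state machine; same result, no intermediate string.

-- ===== PORT A =====
-- A's 'for i in query: if i == '.': …; break' loop; 'query.index(i)' is exact here
-- because the dot branch only runs when '.' occurs in q (the loop walks q itself).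
def nebulaRemoveLoop (q : List Char) : List Char → List Char
  | [] => q
  | i :: rest =>
    if i = '.' then
      PySem.List.slice q none (some (PySem.Chars.find q ['.'])) ++
        PySem.List.slice q (some (PySem.Chars.find q ['.'] + 1)) none
    else nebulaRemoveLoop q rest

def nebulaisdigit (query : String) : Bool :=
  let q := query.toList
  let q := if PySem.Chars.startswith q ['-'] then PySem.List.slice q (some 1) none else q
  let q := if PySem.Chars.isIn ['.'] q then nebulaRemoveLoop q q else q
  PySem.Chars.strIsdigit q

-- ===== PORT B =====
def nebulaAltLoop : List Char → Bool → Bool → Bool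
  | [], _, hasChar => hasChar
  | c :: rest, seenDot, hasChar =>
    if c = '.' && !seenDot then nebulaAltLoop rest true hasChar
    else if !(PySem.Chars.isdigit c) then false
    else nebulaAltLoop rest seenDot true

def nebulaisdigit_alt (query : String) : Bool :=
  let s := query.toList
  let s := if PySem.Chars.startswith s ['-'] then PySem.List.slice s (some 1) none else s
  nebulaAltLoop s false false

-- ===== PRECONDITION & SPEC =====
def Spec_nebulaisdigit (query : String) (out : Bool) : Prop := out = nebulaisdigit_alt query
instance (query : String) (out : Bool) : Decidable (Spec_nebulaisdigit query out) := by unfold Spec_nebulaisdigit; infer_instance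

-- ===== CLAIM (what is proved, stated in full; the proofs are below) =====
def Claim_equal_nebulaisdigit : Prop := ∀ (query : String), Dom_nebulaisdigit query → Spec_nebulaisdigit query (nebulaisdigit query)

-- ===== LEMMAS AND PROOFS =====

-- find with a singleton needle is idxOf (when the character occurs)
lemma findgo_singleton (c : Char) : ∀ (q : List Char) (k : Nat), c ∈ q →
    PySem.Chars.find.go [c] q k = ((k : Int) + q.idxOf c) := by
  intro q
  induction q with
  | nil => intro k h; cases h
  | cons a rest ih =>
    intro k h
    by_cases hac : a = c
    · subst hac
      simp [PySem.Chars.find.go, List.isPrefixOf, List.idxOf_cons_self]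
    · have hmem : c ∈ rest := by
        rcases List.mem_cons.mp h with h1 | h1
        · exact absurd h1.symm hac
        · exact h1
      have : List.isPrefixOf [c] (a :: rest) = false := by
        simp [List.isPrefixOf]; intro hca; exact absurd hca.symm hac
      rw [PySem.Chars.find.go, this]
      simp only [Bool.false_eq_true, if_false, ih (k + 1) hmem]
      rw [List.idxOf_cons_ne _ (by exact fun h' => hac h')]
      push_cast; ring

lemma find_singleton (c : Char) (q : List Char) (h : c ∈ q) :
    PySem.Chars.find q [c] = (q.idxOf c : Int) := by
  have := findgo_singleton c q 0 h
  simpa [PySem.Chars.find] using this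

-- A's dot-removal loop computes q.erase '.'
lemma removeLoop_eq (q : List Char) (hq : '.' ∈ q) : ∀ (l : List Char), '.' ∈ l →
    nebulaRemoveLoop q l = q.erase '.' := by
  intro l
  induction l with
  | nil => intro h; cases h
  | cons c rest ih =>
    intro h
    by_cases hc : c = '.'
    · subst hc
      rw [nebulaRemoveLoop, if_pos rfl, find_singleton _ _ hq]
      rw [PySem.List.slice_to _ (by positivity)]
      rw [PySem.List.slice_from _ (by positivity)]
      have h1 : ((q.idxOf '.' : Int)).toNat = q.idxOf '.' := Int.toNat_natCast _
      have h2 : ((q.idxOf '.' : Int) + 1).toNat = q.idxOf '.' + 1 := by omega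
      rw [h1, h2, ← List.eraseIdx_eq_take_drop_succ,
        ← List.erase_eq_eraseIdx_of_idxOf rfl]
    · have hmem : '.' ∈ rest := by
        rcases List.mem_cons.mp h with h1 | h1
        · exact absurd h1.symm hc
        · exact h1
      rw [nebulaRemoveLoop, if_neg hc]
      exact ih hmem

-- B's loop once a dot has been seen: everything left must be a digit
lemma altLoop_seen : ∀ (l : List Char) (h : Bool),
    nebulaAltLoop l true h = (l.all PySem.Chars.isdigit && (h || !l.isEmpty)) := by
  intro l
  induction l with
  | nil => intro h; simp [nebulaAltLoop]
  | cons c rest ih =>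
    intro h
    rw [nebulaAltLoop]
    by_cases hd : PySem.Chars.isdigit c
    · simp only [Bool.and_false, Bool.false_eq_true, if_false, hd, Bool.not_true,
        Bool.false_eq_true, if_false, ih true]
      simp [hd]
    · have hc : (c = '.' && !true) = false := by simp
      rw [hc]
      simp [hd]

-- B's loop before any dot equals isdigit-after-erasing-the-first-dot
lemma altLoop_unseen : ∀ (l : List Char) (h : Bool),
    nebulaAltLoop l false h =
      ((if '.' ∈ l then l.erase '.' else l).all PySem.Chars.isdigit &&
       (h || !(if '.' ∈ l then l.erase '.' else l).isEmpty)) := by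
  intro l
  induction l with
  | nil => intro h; simp [nebulaAltLoop]
  | cons c rest ih =>
    intro h
    rw [nebulaAltLoop]
    by_cases hc : c = '.'
    · subst hc
      simp only [Bool.not_false, Bool.and_true, altLoop_seen rest h]
      simp [List.erase_cons_head]
    · have hskip : (c = '.' && !false) = false := by simp [hc]
      rw [hskip]
      simp only [Bool.false_eq_true, if_false]
      by_cases hd : PySem.Chars.isdigit c
      · rw [if_neg (by simp [hd]), ih true]
        by_cases hdot : '.' ∈ rest
        · have hdot' : '.' ∈ c :: rest := List.mem_cons_of_mem _ hdot
          rw [if_pos hdot, if_pos hdot', List.erase_cons_tail (by simp [hc])]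
          simp [hd]
        · have hdot' : '.' ∉ c :: rest := by
            intro hx
            rcases List.mem_cons.mp hx with h1 | h1
            · exact hc h1.symm
            · exact hdot h1
          rw [if_neg hdot, if_neg hdot']
          simp [hd]
      · rw [if_pos (by simp [hd])]
        by_cases hdot : '.' ∈ c :: rest
        · rw [if_pos hdot, List.erase_cons_tail (by simp [hc])]
          simp [hd]
        · rw [if_neg hdot]
          simp [hd]

-- isIn with a singleton needle is membership
lemma isIn_singleton (c : Char) (q : List Char) :
    PySem.Chars.isIn [c] q = true ↔ c ∈ q := by
  rw [PySem.Chars.isIn_iff_infix, List.singleton_infix_iff]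

-- the common core: after the '-' strip both sides agree
lemma core_eq (q : List Char) :
    PySem.Chars.strIsdigit (if PySem.Chars.isIn ['.'] q then nebulaRemoveLoop q q else q) =
      nebulaAltLoop q false false := by
  rw [altLoop_unseen q false]
  by_cases hm : '.' ∈ q
  · rw [if_pos ((isIn_singleton '.' q).mpr hm), removeLoop_eq q hm q hm, if_pos hm]
    simp [PySem.Chars.strIsdigit, Bool.and_comm]
  · rw [if_neg (by simp [isIn_singleton, hm]), if_neg hm]
    simp [PySem.Chars.strIsdigit, Bool.and_comm]

-- ===== VERDICT (by name: the statement is the Claim_ definition above) =====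
theorem nebulaisdigit_spec : Claim_equal_nebulaisdigit := by
  intro query _
  unfold Spec_nebulaisdigit nebulaisdigit nebulaisdigit_alt
  by_cases hs : PySem.Chars.startswith query.toList ['-']
  · simp only [hs, if_true]
    exact core_eq _
  · simp only [hs, Bool.false_eq_true, if_false]
    exact core_eq _
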